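-- pv_equiv track=rewrite | github.com/VICamaraPrg/dailyProgrammerPython | easy/necklace_matching_383.py | repeats
-- ===== SOURCE A (Python) =====
-- def repeats(necklace):  # Bonus 1
--     reference = necklace
--     repeat = 0
--     for i in range(len(reference)):
--         necklace = necklace[-1] + necklace[:-1]
--         if necklace == reference:
--             repeat += 1
--     return repeat
-- ===== SOURCE B (Python) =====
-- def repeats(necklace):
--     # Smallest-period approach: the rotations equal to the original are exactly
--     # the rotations by multiples of the smallest period d (a divisor of n),
--     # so the answer is n // d for the least divisor d with rotate-by-d == original.
--     n = len(necklace)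
--     doubled = necklace + necklace
--     for d in range(1, n + 1):
--         if n % d == 0 and doubled[d:d + n] == necklace:
--             return n // d
--     return 0
-- ===== Notes on version B (the rewrite author's own statement) =====
-- stated objective: faster
-- what changed: Instead of cumulatively rotating the string n times and comparing each rotation (Theta(n^2)), B scans divisors d of n in increasing order and returns n//d for the smallest divisor whose rotation equals the original (rotations fixing the string form the multiples of the smallest period), doing one O(n) slice comparison per divisor.
import Mathlib
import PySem

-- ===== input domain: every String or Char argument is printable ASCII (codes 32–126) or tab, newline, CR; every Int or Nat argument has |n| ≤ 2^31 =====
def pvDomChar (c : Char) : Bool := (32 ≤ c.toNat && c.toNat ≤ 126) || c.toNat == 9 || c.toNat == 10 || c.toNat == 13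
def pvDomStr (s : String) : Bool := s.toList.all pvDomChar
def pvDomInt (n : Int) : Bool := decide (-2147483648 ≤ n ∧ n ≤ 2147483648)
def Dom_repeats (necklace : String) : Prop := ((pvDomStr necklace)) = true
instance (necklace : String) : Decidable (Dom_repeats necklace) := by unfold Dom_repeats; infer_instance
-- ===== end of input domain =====

-- B replaces A's n cumulative rotate-and-compare passes by a scan of the divisors d of n,
-- returning n/d for the smallest divisor whose rotation equals the original (objective: faster).

-- ===== PORT A =====
-- A: cumulatively right-rotate the string n times, counting how often it equals the original.
-- (`.elim []` below is the IndexError branch of necklace[-1]; it is unreachable: the loop body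
-- only runs when the string is nonempty.)
def repeats (necklace : String) : Int :=
  let reference := necklace.toList
  let st := (PySem.List.pyRange 0 (PySem.Chars.len reference) 1).foldl
    (fun (st : List Char × Int) _ =>
      let neck := (PySem.List.pyGet? st.1 (-1)).elim [] (fun c => [c]) ++
                  PySem.Chars.slice st.1 none (some (-1))
      (neck, if neck = reference then st.2 + 1 else st.2))
    (reference, 0)
  st.2

-- ===== PORT B =====
-- B: first d in 1..n with d ∣ n and doubled[d:d+n] == necklace; return n // d (0 for the empty string).
def repeats_alt (necklace : String) : Int :=
  let s := necklace.toList
  let n : Int := PySem.Chars.len s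
  let doubled := s ++ s
  match (PySem.List.pyRange 1 (n + 1) 1).findSome? (fun d =>
      if PySem.Int.mod n d = 0 ∧ PySem.Chars.slice doubled (some d) (some (d + n)) = s
      then some (PySem.Int.floordiv n d) else none) with
  | some r => r
  | none => 0

-- ===== PRECONDITION & SPEC =====
def Spec_repeats (necklace : String) (out : Int) : Prop := out = repeats_alt necklace
instance (necklace : String) (out : Int) : Decidable (Spec_repeats necklace out) := by unfold Spec_repeats; infer_instance

-- ===== CLAIM (what is proved, stated in full; the proofs are below) =====
def Claim_equal_repeats : Prop := ∀ (necklace : String), Dom_repeats necklace → Spec_repeats necklace (repeats necklace)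

-- ===== LEMMAS AND PROOFS =====

-- one right rotation, as A's loop body computes it
def rotR (l : List Char) : List Char :=
  (PySem.List.pyGet? l (-1)).elim [] (fun c => [c]) ++ PySem.Chars.slice l none (some (-1))

-- hit count of A's loop, peeled off the fold
def rotCnt (ref : List Char) (l : List Char) : Nat → Nat
  | 0 => 0
  | m + 1 => (if rotR l = ref then 1 else 0) + rotCnt ref (rotR l) m

lemma rotR_eq_rotate (l : List Char) (h : l ≠ []) : rotR l = l.rotate (l.length - 1) := by
  have hlen : 1 ≤ l.length := List.length_pos_iff.mpr h
  rw [List.rotate_eq_drop_append_take (by omega)]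
  unfold rotR
  rw [PySem.Chars.slice_eq_listSlice, PySem.List.slice_to_neg_one]
  simp [PySem.List.pyGet?, PySem.List.pyIdx?, hlen]
  rw [List.getElem?_eq_getElem (by omega)]
  simp only [Option.elim_some]
  congr 1
  · rw [List.drop_eq_getElem_cons (by omega), List.drop_eq_nil_iff.mpr (by omega)]
  · exact List.dropLast_eq_take

lemma foldA (ref : List Char) (is : List Int) (l : List Char) (r : Int) :
    (is.foldl (fun (st : List Char × Int) _ =>
      let neck := (PySem.List.pyGet? st.1 (-1)).elim [] (fun c => [c]) ++
                  PySem.Chars.slice st.1 none (some (-1))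
      (neck, if neck = ref then st.2 + 1 else st.2)) (l, r)).2
    = r + (rotCnt ref l is.length : Int) := by
  induction is generalizing l r with
  | nil => simp [rotCnt]
  | cons i is ih =>
    simp only [List.foldl_cons, List.length_cons, rotCnt]
    show (List.foldl _ (rotR l, if rotR l = ref then r + 1 else r) is).2 = _
    rw [ih]
    split <;> push_cast <;> ring

-- closure of the fixed-rotation set
lemma rot_add (L : List Char) (a b : Nat) (ha : L.rotate a = L) (hb : L.rotate b = L) :
    L.rotate (a + b) = L := by rw [← List.rotate_rotate, ha, hb]

lemma rot_sub (L : List Char) (a b : Nat) (hab : L.rotate (a + b) = L) (ha : L.rotate a = L) :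
    L.rotate b = L := by
  calc L.rotate b = (L.rotate a).rotate b := by rw [ha]
    _ = L.rotate (a + b) := List.rotate_rotate L a b
    _ = L := hab

lemma rot_mul (L : List Char) (q m : Nat) (hq : L.rotate q = L) : L.rotate (q * m) = L := by
  induction m with
  | zero => simp
  | succ m ih => rw [Nat.mul_succ]; exact rot_add L (q * m) q ih hq

-- the least positive rotation fixing L characterises all of them
lemma rot_iff_dvd (L : List Char) (hex : ∃ t, 0 < t ∧ L.rotate t = L) (t : Nat) :
    L.rotate t = L ↔ Nat.find hex ∣ t := by
  set q := Nat.find hex with hqdef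
  have hq := Nat.find_spec hex
  constructor
  · intro ht
    have hmul : L.rotate (q * (t / q)) = L := rot_mul L q (t / q) hq.2
    have hmod : L.rotate (t % q) = L := by
      apply rot_sub L (q * (t / q)) (t % q) _ hmul
      rw [Nat.div_add_mod]; exact ht
    by_contra hdvd
    have hpos : 0 < t % q := by
      rcases Nat.eq_zero_or_pos (t % q) with h0 | h0
      · exact absurd ((Nat.dvd_iff_mod_eq_zero).mpr h0) hdvd
      · exact h0
    exact Nat.find_min hex (Nat.mod_lt t hq.1) ⟨hpos, hmod⟩
  · rintro ⟨m, rfl⟩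
    exact rot_mul L q m hq.2

lemma count_dvd_range (q m : Nat) (hq : 0 < q) :
    (List.range (q * m)).countP (fun j => decide (q ∣ (j + 1))) = m := by
  induction m with
  | zero => simp
  | succ m ih =>
    rw [Nat.mul_succ, List.range_add, List.countP_append, ih, List.countP_map]
    have h1 : ∀ j ∈ List.range q,
        (((fun j => decide (q ∣ j + 1)) ∘ fun x => q * m + x) j = true ↔ ((j == q - 1) = true)) := by
      intro j hj
      rw [List.mem_range] at hj
      simp only [Function.comp, decide_eq_true_eq, beq_iff_eq]
      rcases eq_or_ne j (q - 1) with h | h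
      · subst h
        have he : q * m + (q - 1) + 1 = q * (m + 1) := by rw [Nat.mul_succ]; omega
        rw [he]
        exact ⟨fun _ => rfl, fun _ => Dvd.intro _ rfl⟩
      · have hnd : ¬ q ∣ (q * m + j + 1) := by
          intro hd
          have h2 : q ∣ (j + 1) := by
            have he : q * m + j + 1 - q * m = j + 1 := by omega
            exact he ▸ Nat.dvd_sub hd (Dvd.intro m rfl)
          have := Nat.le_of_dvd (by omega) h2
          omega
        exact ⟨fun hc => absurd hc hnd, fun hc => absurd hc h⟩
    rw [List.countP_congr h1]
    have h2 : (List.range q).countP (fun j => j == q - 1) = (List.range q).count (q - 1) := rfl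
    rw [h2, List.count_eq_one_of_mem List.nodup_range (by simp; omega)]

-- A's counter after m steps, in terms of rotation exponents
lemma rotCnt_eq (L : List Char) (hL : L ≠ []) (m k : Nat) :
    rotCnt L (L.rotate k) m
      = (List.range m).countP (fun j => decide (L.rotate (k + (L.length - 1) * (j + 1)) = L)) := by
  induction m generalizing k with
  | zero => simp [rotCnt]
  | succ m ih =>
    have hne : L.rotate k ≠ [] := fun h => hL (List.rotate_eq_nil_iff.mp h)
    have hstep : rotR (L.rotate k) = L.rotate (k + (L.length - 1)) := by
      rw [rotR_eq_rotate _ hne, List.length_rotate, List.rotate_rotate]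
    simp only [rotCnt, hstep, ih (k + (L.length - 1))]
    rw [List.range_succ_eq_map, List.countP_cons, List.countP_map]
    have h1 : ∀ j ∈ List.range m,
        (((fun j => decide (L.rotate (k + (L.length - 1) * (j + 1)) = L)) ∘ Nat.succ) j = true ↔
         ((fun j => decide (L.rotate (k + (L.length - 1) + (L.length - 1) * (j + 1)) = L)) j = true)) := by
      intro j _
      simp only [Function.comp, decide_eq_true_eq]
      have he : k + (L.length - 1) * (j.succ + 1) = k + (L.length - 1) + (L.length - 1) * (j + 1) := by
        simp only [Nat.succ_eq_add_one]; ring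
      rw [he]
    rw [List.countP_congr h1]
    simp only [Nat.mul_one, Nat.zero_add, decide_eq_true_eq]
    omega

-- B's slice doubled[d:d+n] is the left rotation by d
lemma slice_rotate (L : List Char) (d : Nat) (hd : d ≤ L.length) :
    PySem.Chars.slice (L ++ L) (some (d : Int)) (some ((d : Int) + (L.length : Int)))
      = L.rotate d := by
  rw [PySem.Chars.slice_eq_listSlice,
      PySem.List.slice_toNat _ (by positivity) (by positivity)]
  have h1 : ((d : Int)).toNat = d := Int.toNat_natCast d
  have h2 : ((d : Int) + (L.length : Int)).toNat = d + L.length := by omega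
  rw [h1, h2, List.drop_append_of_le_length hd, List.take_append,
      List.take_of_length_le (by simp), List.rotate_eq_drop_append_take hd]
  have h3 : d + L.length - d - (List.drop d L).length = d := by
    simp only [List.length_drop]; omega
  rw [h3]

-- ===== VERDICT (by name: the statement is the Claim_ definition above) =====
theorem repeats_spec : Claim_equal_repeats := by
  unfold Claim_equal_repeats Spec_repeats
  intro necklace _
  set L := necklace.toList with hLdef
  rcases eq_or_ne L [] with hnil | hL
  · simp [repeats, repeats_alt, ← hLdef, hnil, PySem.Chars.len]
  · have hn : 0 < L.length := List.length_pos_iff.mpr hL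
    set n := L.length with hndef
    have hex : ∃ t, 0 < t ∧ L.rotate t = L := ⟨n, hn, List.rotate_length L⟩
    set q := Nat.find hex with hqdef
    have hqpos : 0 < q := (Nat.find_spec hex).1
    have hqrot : L.rotate q = L := (Nat.find_spec hex).2
    have hqn : q ∣ n := (rot_iff_dvd L hex n).mp (List.rotate_length L)
    have hqle : q ≤ n := Nat.le_of_dvd hn hqn
    -- A computes n / q
    have hA : repeats necklace = ((n / q : Nat) : Int) := by
      have h0 : repeats necklace
          = (rotCnt L L (PySem.List.pyRange 0 (PySem.Chars.len L) 1).length : Int) := by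
        simp only [repeats, ← hLdef]
        rw [foldA]
        ring
      rw [h0]
      have hlen : (PySem.List.pyRange 0 (PySem.Chars.len L) 1).length = n := by
        rw [PySem.Chars.len_eq, PySem.List.length_pyRange_one]
        omega
      rw [hlen]
      have h1 := rotCnt_eq L hL n 0
      rw [List.rotate_zero] at h1
      rw [h1]
      have h2 : ∀ j ∈ List.range n,
          ((fun j => decide (L.rotate (0 + (n - 1) * (j + 1)) = L)) j = true ↔
           ((fun j => decide (q ∣ (j + 1))) j = true)) := by
        intro j _
        simp only [Nat.zero_add, decide_eq_true_eq]
        rw [rot_iff_dvd L hex ((n - 1) * (j + 1)), ← hqdef]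
        constructor
        · intro h
          have hns : q ∣ n * (j + 1) := Dvd.dvd.mul_right hqn (j + 1)
          have he : n * (j + 1) - (n - 1) * (j + 1) = j + 1 := by
            rw [← Nat.sub_mul]
            have : n - (n - 1) = 1 := by omega
            rw [this, Nat.one_mul]
          exact he ▸ Nat.dvd_sub hns h
        · intro h
          exact Dvd.dvd.mul_left h (n - 1)
      rw [List.countP_congr h2]
      have h3 : q * (n / q) = n := Nat.mul_div_cancel' hqn
      have h4 := count_dvd_range q (n / q) hqpos
      rw [h3] at h4
      rw [h4]
    -- B computes n / q
    have hB : repeats_alt necklace = ((n / q : Nat) : Int) := by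
      simp only [repeats_alt, ← hLdef, PySem.Chars.len_eq, ← hndef]
      have hsplit : PySem.List.pyRange 1 ((n : Int) + 1) 1
          = PySem.List.pyRange 1 (q : Int) 1 ++ PySem.List.pyRange (q : Int) ((n : Int) + 1) 1 :=
        PySem.List.pyRange_one_append 1 (q : Int) ((n : Int) + 1)
          (by exact_mod_cast hqpos) (by exact_mod_cast Nat.le_succ_of_le hqle)
      rw [hsplit, List.findSome?_append]
      have hnone : (PySem.List.pyRange 1 (q : Int) 1).findSome? (fun d =>
          if PySem.Int.mod (n : Int) d = 0 ∧
             PySem.Chars.slice (L ++ L) (some d) (some (d + (n : Int))) = L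
          then some (PySem.Int.floordiv (n : Int) d) else none) = none := by
        apply List.findSome?_eq_none_iff.mpr
        intro d hd
        rw [PySem.List.mem_pyRange_one] at hd
        obtain ⟨hd1, hd2⟩ := hd
        set k := d.toNat with hkdef
        have hdk : d = (k : Int) := (Int.toNat_of_nonneg (by omega)).symm
        have hk1 : 1 ≤ k := by omega
        have hkq : k < q := by omega
        rw [if_neg]
        rintro ⟨_, hslice⟩
        rw [hdk, slice_rotate L k (by omega)] at hslice
        have := Nat.le_of_dvd (by omega) ((rot_iff_dvd L hex k).mp hslice)
        omega
      rw [hnone]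
      have hcons : PySem.List.pyRange (q : Int) ((n : Int) + 1) 1
          = (q : Int) :: PySem.List.pyRange ((q : Int) + 1) ((n : Int) + 1) 1 :=
        PySem.List.pyRange_one_cons (by exact_mod_cast Nat.lt_succ_of_le hqle)
      rw [hcons, List.findSome?_cons]
      have hcond : PySem.Int.mod (n : Int) (q : Int) = 0 ∧
          PySem.Chars.slice (L ++ L) (some (q : Int)) (some ((q : Int) + (n : Int))) = L := by
        constructor
        · rw [PySem.Int.mod_eq_zero_iff_dvd]
          exact_mod_cast hqn
        · rw [slice_rotate L q hqle]
          exact hqrot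
      rw [if_pos hcond, PySem.Int.floordiv_natCast]
      simp
    rw [hA, hB]
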